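-- pv_equiv track=rewrite | github.com/Fred51/Salesforce-To-Sql | Python/JetDataload.py | addUniqueListElement
-- ===== SOURCE A (Python) =====
-- def addUniqueListElement (baseList, element, identifier=0):
--     if(identifier == 0):
--         padding = ""
--     else:
--         padding = str(identifier)
--     if(len(element) + len(padding) > 30):
--         checkElement = element[:-(len(element + padding) - 30)] + padding
--     else:
--         checkElement = element + padding
--     if(checkElement in baseList):
--         return addUniqueListElement(baseList, element, identifier + 1)
--     else:
--         return checkElement
-- ===== SOURCE B (Python) =====
-- def _candidate(element, identifier):
--     padding = "" if identifier == 0 else str(identifier)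
--     if len(element) + len(padding) <= 30:
--         return element + padding
--     return element[:max(0, 30 - len(padding))] + padding
--
--
-- def addUniqueListElement(baseList, element, identifier=0):
--     k = identifier
--     while True:
--         cand = _candidate(element, k)
--         if cand not in baseList:
--             return cand
--         k += 1
-- ===== Notes on version B (the rewrite author's own statement) =====
-- stated objective: simpler
-- what changed: Replaces A's tail recursion with a candidate helper plus an explicit counting loop, and computes the truncation as a direct non-negative prefix length max(0, 30-len(padding)) instead of A's negative-index slice.
import Mathlib
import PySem

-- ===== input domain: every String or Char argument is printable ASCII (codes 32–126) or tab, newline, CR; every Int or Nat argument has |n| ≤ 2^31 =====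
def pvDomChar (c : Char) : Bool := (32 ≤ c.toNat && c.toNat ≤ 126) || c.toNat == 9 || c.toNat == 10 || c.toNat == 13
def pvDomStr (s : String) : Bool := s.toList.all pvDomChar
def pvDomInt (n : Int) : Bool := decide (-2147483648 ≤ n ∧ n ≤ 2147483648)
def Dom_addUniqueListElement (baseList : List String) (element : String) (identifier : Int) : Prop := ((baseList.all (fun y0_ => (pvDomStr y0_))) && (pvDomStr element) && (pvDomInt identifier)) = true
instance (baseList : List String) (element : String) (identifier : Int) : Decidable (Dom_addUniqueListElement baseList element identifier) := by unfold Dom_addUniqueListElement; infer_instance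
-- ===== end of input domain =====

-- B replaces A's tail recursion by an explicit candidate helper plus a counting loop,
-- and computes the truncation as a direct non-negative prefix length instead of A's
-- negative-index slice; same return value everywhere (objective: simpler).
-- Both recursions terminate: once the counter's decimal string is longer than 30 and
-- than every list entry, the candidate is that string itself and cannot be in the list.

-- termination bound helpers (used by both ports' decreasing_by, hence above the ports)
def pvMaxLen (baseList : List String) : Nat :=
  (baseList.map (fun s => s.toList.length)).foldr max 0

def pvBound (baseList : List String) : Nat := max 31 (pvMaxLen baseList + 1)

theorem pv_tdc_append (b f n : Nat) (l : List Char) :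
    (Nat.toDigitsCore b f n l).length = (Nat.toDigitsCore b f n []).length + l.length := by
  induction l with
  | nil => rfl
  | cons c tl ih =>
    rw [Nat.toDigitsCore_lens_eq b f n c tl, ih]
    simp; omega

theorem pv_tdc_pos (b f n : Nat) (hf : 0 < f) : 1 ≤ (Nat.toDigitsCore b f n []).length := by
  cases f with
  | zero => omega
  | succ f =>
    simp only [Nat.toDigitsCore]
    split
    · simp
    · rw [pv_tdc_append]; simp

theorem pv_tdc_lb (b : Nat) (hb : 2 ≤ b) :
    ∀ (e f n : Nat), n < f → b ^ e ≤ n → e + 1 ≤ (Nat.toDigitsCore b f n []).length := by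
  intro e
  induction e with
  | zero => intro f n hf _; exact pv_tdc_pos b f n (by omega)
  | succ e ih =>
    intro f n hf hn
    have hbn : b ≤ n := le_trans (Nat.le_self_pow (by omega) b) hn
    cases f with
    | zero => omega
    | succ f =>
      have hdiv : n / b ≠ 0 := by
        have := Nat.one_le_div_iff (by omega : 0 < b) |>.mpr hbn; omega
      simp only [Nat.toDigitsCore, hdiv, if_false]
      rw [pv_tdc_append]
      have h1 : b ^ e ≤ n / b := (Nat.le_div_iff_mul_le (by omega)).mpr (by rw [← pow_succ]; exact hn)
      have h2 : n / b < f := by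
        have := Nat.div_lt_self (by omega : 0 < n) (by omega : 1 < b); omega
      have := ih f (n / b) h2 h1
      simp; omega

theorem pv_toChars_lb (i : Int) (E : Nat) (h : (10 : Int) ^ E ≤ i) :
    E + 1 ≤ (PySem.Int.toChars i).length := by
  have hi : 0 < i := lt_of_lt_of_le (by positivity) h
  have h10 : (10 : Nat) ^ E ≤ i.toNat := by
    have : ((10 : Nat) ^ E : Int) ≤ i := by push_cast; exact h
    omega
  simp only [PySem.Int.toChars, if_neg (by omega : ¬ i < 0)]
  exact pv_tdc_lb 10 (by omega) E (i.toNat + 1) i.toNat (by omega) h10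

theorem pv_mem_le_maxLen {baseList : List String} {s : String} (h : s ∈ baseList) :
    s.toList.length ≤ pvMaxLen baseList := by
  induction baseList with
  | nil => cases h
  | cons t ts ih =>
    simp only [pvMaxLen, List.map, List.foldr] at *
    rcases List.mem_cons.mp h with rfl | h'
    · omega
    · have := ih h'; omega

theorem pv_not_mem_of_long {baseList : List String} {cs : List Char}
    (h : pvMaxLen baseList < cs.length) : String.ofList cs ∉ baseList := by
  intro hmem
  have := pv_mem_le_maxLen hmem
  simp at this
  omega

-- where A raises in the `if` guard: padding then so long that the candidate is str(identifier)
theorem pv_pad_big {baseList : List String} {i : Int}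
    (h : (10 : Int) ^ pvBound baseList ≤ i) :
    i ≠ 0 ∧ 30 < (PySem.Int.toChars i).length ∧
      pvMaxLen baseList < (PySem.Int.toChars i).length := by
  have hi : 0 < i := lt_of_lt_of_le (by positivity) h
  have hlb := pv_toChars_lb i (pvBound baseList) h
  refine ⟨by omega, ?_, ?_⟩ <;> · unfold pvBound at hlb; omega

-- key fact for port A's termination: past the bound, A's checkElement is not in baseList
theorem pv_keyA (baseList : List String) (element : String) (i : Int)
    (h : (10 : Int) ^ pvBound baseList ≤ i) :
    (if PySem.Chars.len element.toList +
          PySem.Chars.len (if i = 0 then ([] : List Char) else PySem.Int.toChars i) > 30 then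
        String.ofList
          (PySem.Chars.slice element.toList none
              (some (-(PySem.Chars.len
                  (element.toList ++ (if i = 0 then ([] : List Char) else PySem.Int.toChars i)) - 30))) ++
            (if i = 0 then ([] : List Char) else PySem.Int.toChars i))
      else
        String.ofList (element.toList ++ (if i = 0 then ([] : List Char) else PySem.Int.toChars i)))
      ∉ baseList := by
  obtain ⟨hne, h30, hmax⟩ := pv_pad_big (baseList := baseList) h
  rw [if_neg hne]
  set p := PySem.Int.toChars i with hp
  set e := element.toList with he
  rw [if_pos (by simp [PySem.Chars.len_eq]; omega)]
  have hk : (-(PySem.Chars.len (e ++ p) - 30)) = -((e.length + p.length - 30 : Nat) : Int) := by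
    simp [PySem.Chars.len_eq]; omega
  rw [hk]
  rw [PySem.Chars.slice_eq_listSlice,
    PySem.List.slice_to_neg_natCast (k := e.length + p.length - 30) e (by omega)]
  have : e.length - (e.length + p.length - 30) = 0 := by omega
  rw [this, List.take_zero, List.nil_append]
  exact pv_not_mem_of_long hmax

-- ===== PORT A =====
def addUniqueListElement (baseList : List String) (element : String) (identifier : Int) : String :=
  let padding : List Char := if identifier = 0 then [] else PySem.Int.toChars identifier
  let checkElement : String :=
    if PySem.Chars.len element.toList + PySem.Chars.len padding > 30 then
      String.ofList
        (PySem.Chars.slice element.toList none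
            (some (-(PySem.Chars.len (element.toList ++ padding) - 30))) ++ padding)
    else
      String.ofList (element.toList ++ padding)
  if h : checkElement ∈ baseList then
    addUniqueListElement baseList element (identifier + 1)
  else
    checkElement
termination_by ((10 : Int) ^ pvBound baseList - identifier).toNat
decreasing_by
  have hlt : identifier < (10 : Int) ^ pvBound baseList := by
    by_contra hge
    exact pv_keyA baseList element identifier (by omega) h
  omega

-- ===== PORT B =====
-- candidate for a given counter value (Source B's _candidate)
def pvCandidate (element : String) (identifier : Int) : String :=
  let padding : List Char := if identifier = 0 then [] else PySem.Int.toChars identifier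
  if PySem.Chars.len element.toList + PySem.Chars.len padding ≤ 30 then
    String.ofList (element.toList ++ padding)
  else
    String.ofList
      (PySem.Chars.slice element.toList none (some (max 0 (30 - PySem.Chars.len padding))) ++ padding)

theorem pv_keyB (baseList : List String) (element : String) (k : Int)
    (h : (10 : Int) ^ pvBound baseList ≤ k) : pvCandidate element k ∉ baseList := by
  obtain ⟨hne, h30, hmax⟩ := pv_pad_big (baseList := baseList) h
  unfold pvCandidate
  rw [if_neg hne]
  set p := PySem.Int.toChars k with hp
  rw [if_neg (by simp [PySem.Chars.len_eq]; omega)]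
  have hm : (max 0 (30 - PySem.Chars.len p)) = (0 : Int) := by
    simp [PySem.Chars.len_eq]; omega
  rw [hm, PySem.Chars.slice_eq_listSlice,
    PySem.List.slice_to (xs := element.toList) (b := (0 : Int)) le_rfl]
  simp only [Int.toNat_zero, List.take_zero, List.nil_append]
  exact pv_not_mem_of_long hmax

-- the while-True loop of Source B
def pvLoop (baseList : List String) (element : String) (k : Int) : String :=
  let cand := pvCandidate element k
  if h : cand ∈ baseList then pvLoop baseList element (k + 1) else cand
termination_by ((10 : Int) ^ pvBound baseList - k).toNat
decreasing_by
  have hlt : k < (10 : Int) ^ pvBound baseList := by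
    by_contra hge
    exact pv_keyB baseList element k (by omega) h
  omega

def addUniqueListElement_alt (baseList : List String) (element : String) (identifier : Int) : String :=
  pvLoop baseList element identifier

-- ===== PRECONDITION & SPEC =====
def Spec_addUniqueListElement (baseList : List String) (element : String) (identifier : Int) (out : String) : Prop := out = addUniqueListElement_alt baseList element identifier
instance (baseList : List String) (element : String) (identifier : Int) (out : String) : Decidable (Spec_addUniqueListElement baseList element identifier out) := by unfold Spec_addUniqueListElement; infer_instance

-- ===== CLAIM (what is proved, stated in full; the proofs are below) =====
def Claim_equal_addUniqueListElement : Prop := ∀ (baseList : List String) (element : String) (identifier : Int), Dom_addUniqueListElement baseList element identifier → Spec_addUniqueListElement baseList element identifier (addUniqueListElement baseList element identifier)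

-- ===== LEMMAS AND PROOFS =====

-- A's checkElement and B's candidate coincide at every counter value
theorem pv_cand_eq (element : String) (i : Int) :
    (if PySem.Chars.len element.toList +
          PySem.Chars.len (if i = 0 then ([] : List Char) else PySem.Int.toChars i) > 30 then
        String.ofList
          (PySem.Chars.slice element.toList none
              (some (-(PySem.Chars.len
                  (element.toList ++ (if i = 0 then ([] : List Char) else PySem.Int.toChars i)) - 30))) ++
            (if i = 0 then ([] : List Char) else PySem.Int.toChars i))
      else
        String.ofList (element.toList ++ (if i = 0 then ([] : List Char) else PySem.Int.toChars i)))
      = pvCandidate element i := by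
  unfold pvCandidate
  set p := (if i = 0 then ([] : List Char) else PySem.Int.toChars i) with hp
  set e := element.toList with he
  by_cases hc : PySem.Chars.len e + PySem.Chars.len p > 30
  · rw [if_pos hc, if_neg (by simp only [PySem.Chars.len_eq] at hc ⊢; omega)]
    have hlen : 30 < e.length + p.length := by
      simp only [PySem.Chars.len_eq] at hc; omega
    congr 1
    have hk : (-(PySem.Chars.len (e ++ p) - 30)) = -((e.length + p.length - 30 : Nat) : Int) := by
      simp [PySem.Chars.len_eq]; omega
    have hm : (max 0 (30 - PySem.Chars.len p)) = ((30 - p.length : Nat) : Int) := by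
      simp [PySem.Chars.len_eq]; omega
    rw [hk, hm, PySem.Chars.slice_eq_listSlice, PySem.Chars.slice_eq_listSlice,
      PySem.List.slice_to_neg_natCast (k := e.length + p.length - 30) e (by omega),
      PySem.List.slice_to (xs := e) (b := ((30 - p.length : Nat) : Int)) (by positivity)]
    simp only [Int.toNat_natCast]
    have harg : e.length - (e.length + p.length - 30) = 30 - p.length := by omega
    rw [harg]
  · rw [if_neg hc, if_pos (by simp only [PySem.Chars.len_eq] at hc ⊢; omega)]

theorem pv_main (baseList : List String) (element : String) (identifier : Int) :
    addUniqueListElement baseList element identifier = pvLoop baseList element identifier := by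
  rw [addUniqueListElement, pvLoop]
  simp only [pv_cand_eq element identifier]
  split
  · exact pv_main baseList element (identifier + 1)
  · rfl
termination_by ((10 : Int) ^ pvBound baseList - identifier).toNat
decreasing_by
  have hlt : identifier < (10 : Int) ^ pvBound baseList := by
    by_contra hge
    exact pv_keyB baseList element identifier (by omega) (by assumption)
  omega

-- ===== VERDICT (by name: the statement is the Claim_ definition above) =====
theorem addUniqueListElement_spec : Claim_equal_addUniqueListElement := by
  intro baseList element identifier _
  unfold Spec_addUniqueListElement addUniqueListElement_alt
  exact pv_main baseList element identifier
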